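-- pv_equiv track=rewrite | github.com/flippe3/aoc2021 | day3.py | update_inp
-- ===== SOURCE A (Python) =====
-- def update_inp(inp, criteria):
--     new_inp = []
--     ele = 0
--     remove = []
--     for i in inp:
--         for j in range(len(criteria)):
--             if i[j] != criteria[j]:
--                 remove.append(ele)
--                 break
--         ele += 1
--     for i in range(len(inp)):
--         if i not in remove:
--             new_inp.append(inp[i])
--     return new_inp
-- ===== SOURCE B (Python) =====
-- def update_inp(inp, criteria):
--     return [row for row in inp if row.startswith(criteria)]
-- ===== Notes on version B (the rewrite author's own statement) =====
-- stated objective: simpler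
-- what changed: Replaced A's two-pass scheme (build a list of indices to remove by char-by-char comparison, then rebuild by scanning that index list for every position) with a single list comprehension filtering rows by str.startswith.
-- crash fix: A raises IndexError when some row is shorter than criteria and matches it on all of the row's positions (a proper prefix of criteria); B simply drops such rows. — e.g. on update_inp(["0"], "01"): A raises IndexError, B returns []
import Mathlib
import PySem

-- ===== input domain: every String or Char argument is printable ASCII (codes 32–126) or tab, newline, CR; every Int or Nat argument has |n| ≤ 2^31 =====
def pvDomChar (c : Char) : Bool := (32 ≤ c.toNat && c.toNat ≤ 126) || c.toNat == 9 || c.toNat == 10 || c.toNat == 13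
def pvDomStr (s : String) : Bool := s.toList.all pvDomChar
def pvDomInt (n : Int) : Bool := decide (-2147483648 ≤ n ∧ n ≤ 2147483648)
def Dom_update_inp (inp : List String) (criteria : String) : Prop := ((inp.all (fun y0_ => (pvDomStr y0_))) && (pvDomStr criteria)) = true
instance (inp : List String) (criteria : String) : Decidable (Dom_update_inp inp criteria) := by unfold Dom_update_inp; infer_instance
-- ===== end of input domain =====

-- B is a one-pass startswith filter instead of A's remove-index table plus index-based rebuild (simpler).

-- ===== PORT A =====
-- inner loop 'for j in range(len(criteria)): if i[j] != criteria[j]: …break': walks the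
-- two char lists in step; returns true iff a mismatch is hit (row gets removed).
-- The case 'row exhausted while criteria remains' is Python's IndexError raise point
-- (excluded by Pre_update_inp); the port reports a mismatch there.
def pvChkA : List Char → List Char → Bool
  | _, [] => false
  | [], _ :: _ => true
  | a :: as, b :: bs => if a ≠ b then true else pvChkA as bs

def update_inp (inp : List String) (criteria : String) : List String :=
  -- first loop: remove = list of indices ele whose row mismatches
  let remove : List Nat :=
    (inp.foldl (fun (st : List Nat × Nat) i =>
        (if pvChkA i.toList criteria.toList then st.1 ++ [st.2] else st.1, st.2 + 1))
      ([], 0)).1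
  -- second loop: for i in range(len(inp)): if i not in remove: new_inp.append(inp[i])
  (List.range inp.length).foldl
    (fun acc i => if remove.contains i then acc else acc ++ [inp.getD i ""]) []

-- ===== PORT B =====
def update_inp_alt (inp : List String) (criteria : String) : List String :=
  inp.filter (fun row => PySem.Str.startswith row criteria)

-- ===== PRECONDITION & SPEC =====
-- Pre_ excludes exactly the inputs where A raises IndexError: some row that is shorter
-- than criteria and agrees with it on every one of the row's positions.
def Pre_update_inp (inp : List String) (criteria : String) : Prop :=
  ∀ s ∈ inp, ¬ (s.toList.length < criteria.toList.length ∧ s.toList <+: criteria.toList)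
instance (inp : List String) (criteria : String) : Decidable (Pre_update_inp inp criteria) := by
  unfold Pre_update_inp; infer_instance
def pvWitness_update_inp : List String × String := (["101", "100", "111"], "10")

-- A raises IndexError when some row is shorter than criteria and matches it on all of the
-- row's positions (a proper prefix of criteria); B simply drops such rows.
def Raises_update_inp (inp : List String) (criteria : String) : Prop :=
  ∃ s ∈ inp, s.toList.length < criteria.toList.length ∧ s.toList <+: criteria.toList
instance (inp : List String) (criteria : String) : Decidable (Raises_update_inp inp criteria) := by
  unfold Raises_update_inp; infer_instance
def pvRaiseWitness_update_inp : List String × String := (["0"], "01")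
def pvRaiseWitnessOut_update_inp : List String := []

def Spec_update_inp (inp : List String) (criteria : String) (out : List String) : Prop :=
  out = update_inp_alt inp criteria
instance (inp : List String) (criteria : String) (out : List String) : Decidable (Spec_update_inp inp criteria out) := by unfold Spec_update_inp; infer_instance

-- ===== CLAIM (what is proved, stated in full; the proofs are below) =====
def Claim_equal_update_inp : Prop := ∀ (inp : List String) (criteria : String), Dom_update_inp inp criteria → Pre_update_inp inp criteria → Spec_update_inp inp criteria (update_inp inp criteria)
def Claim_raises_update_inp : Prop := (∀ (inp : List String) (criteria : String), Dom_update_inp inp criteria → Raises_update_inp inp criteria → ¬ Pre_update_inp inp criteria) ∧ (Dom_update_inp (pvRaiseWitness_update_inp.1) (pvRaiseWitness_update_inp.2) ∧ Raises_update_inp (pvRaiseWitness_update_inp.1) (pvRaiseWitness_update_inp.2) ∧ update_inp_alt (pvRaiseWitness_update_inp.1) (pvRaiseWitness_update_inp.2) = pvRaiseWitnessOut_update_inp)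

-- ===== LEMMAS AND PROOFS =====

-- under the no-raise hypothesis, the inner loop reports "keep" iff criteria is a prefix of the row
lemma pvChkA_eq_false_iff (row crit : List Char)
    (h : ¬ (row.length < crit.length ∧ row <+: crit)) :
    pvChkA row crit = false ↔ crit <+: row := by
  induction row generalizing crit with
  | nil =>
    cases crit with
    | nil => simp [pvChkA]
    | cons b bs => exact absurd ⟨by simp, List.nil_prefix⟩ h
  | cons a as ih =>
    cases crit with
    | nil => simp [pvChkA]
    | cons b bs =>
      by_cases hab : a = b
      · subst hab
        have h' : ¬ (as.length < bs.length ∧ as <+: bs) := by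
          rintro ⟨h1, h2⟩
          exact h ⟨by simpa using h1, by simpa using h2⟩
        simp [pvChkA, ih bs h']
      · simp only [pvChkA, hab, ne_eq, not_false_eq_true, if_pos, List.cons_prefix_cons]
        constructor
        · intro h'; cases h'
        · rintro ⟨hba, _⟩; exact absurd hba.symm hab

-- the first loop's fold, characterised: it produces the index list pvIdxs and counter k + length
def pvIdxs (crit : List Char) : List String → Nat → List Nat
  | [], _ => []
  | s :: l, k => (if pvChkA s.toList crit then [k] else []) ++ pvIdxs crit l (k + 1)

lemma foldl_remove_eq (crit : List Char) (l : List String) :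
    ∀ (rem0 : List Nat) (k : Nat),
    (l.foldl (fun (st : List Nat × Nat) i =>
        (if pvChkA i.toList crit then st.1 ++ [st.2] else st.1, st.2 + 1)) (rem0, k))
      = (rem0 ++ pvIdxs crit l k, k + l.length) := by
  induction l with
  | nil => intro rem0 k; simp [pvIdxs]
  | cons s l ih =>
    intro rem0 k
    by_cases hc : pvChkA s.toList crit
    · simp [List.foldl_cons, hc, ih, pvIdxs]; omega
    · simp [List.foldl_cons, hc, ih, pvIdxs]; omega

lemma mem_pvIdxs_iff (crit : List Char) (l : List String) :
    ∀ (k i : Nat), i ∈ pvIdxs crit l k ↔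
      ∃ j, j < l.length ∧ i = k + j ∧ pvChkA (l.getD j "").toList crit = true := by
  induction l with
  | nil => intro k i; simp [pvIdxs]
  | cons s l ih =>
    intro k i
    constructor
    · intro hmem
      simp only [pvIdxs, List.mem_append] at hmem
      rcases hmem with hmem | hmem
      · by_cases hc : pvChkA s.toList crit
        · simp [hc] at hmem
          exact ⟨0, by simp, by omega, by simpa [hmem] using hc⟩
        · simp [hc] at hmem
      · rcases (ih (k + 1) i).mp hmem with ⟨j, hj, hi, hchk⟩
        exact ⟨j + 1, by simpa using hj, by omega, by simpa using hchk⟩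
    · rintro ⟨j, hj, hi, hchk⟩
      cases j with
      | zero =>
        simp at hchk
        simp [pvIdxs, hchk, hi]
      | succ j =>
        simp only [pvIdxs, List.mem_append]
        right
        exact (ih (k + 1) i).mpr ⟨j, by simpa using hj, by omega, by simpa using hchk⟩

-- the rebuild loop is a filter-then-map over the index range
lemma rebuild_eq (remove : List Nat) (inp : List String) (n : Nat) :
    ∀ (acc : List String),
    (List.range n).foldl
      (fun acc i => if remove.contains i then acc else acc ++ [inp.getD i ""]) acc
    = acc ++ ((List.range n).filter (fun i => ! remove.contains i)).map (fun i => inp.getD i "") := by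
  induction n with
  | zero => intro acc; simp
  | succ n ih =>
    intro acc
    rw [List.range_succ, List.foldl_append, ih]
    by_cases hc : n ∈ remove
    · simp [hc]
    · simp [hc]

-- index-level filter/map collapses to a direct filter over the list
lemma filter_range_map_getD (q : String → Bool) (l : List String) :
    ((List.range l.length).filter (fun i => q (l.getD i ""))).map (fun i => l.getD i "")
      = l.filter q := by
  induction l with
  | nil => simp
  | cons s l ih =>
    rw [List.length_cons, List.range_succ_eq_map]
    by_cases hq : q s
    · simp only [List.filter_cons, List.getD_cons_zero, hq, if_pos, List.map_cons,
        List.filter_map, List.map_map, Function.comp_def, List.getD_cons_succ, ih]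
    · simp only [List.filter_cons, List.getD_cons_zero, hq, Bool.false_eq_true, if_false,
        List.filter_map, List.map_map, Function.comp_def, List.getD_cons_succ, ih]

-- ===== VERDICT (by name: the statement is the Claim_ definition above) =====
theorem update_inp_spec : Claim_equal_update_inp := by
  intro inp criteria _ hpre
  unfold Spec_update_inp update_inp update_inp_alt
  rw [foldl_remove_eq, rebuild_eq]
  simp only [List.nil_append]
  rw [List.filter_congr (l := List.range inp.length)
      (q := fun i => ! pvChkA ((inp.getD i "").toList) criteria.toList) ?_]
  · rw [filter_range_map_getD (fun s => ! pvChkA s.toList criteria.toList) inp]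
    apply List.filter_congr
    intro s hs
    have h := pvChkA_eq_false_iff s.toList criteria.toList (hpre s hs)
    simp only [PySem.Str.startswith_eq]
    rw [Bool.eq_iff_iff]
    simp only [PySem.Chars.startswith_iff, Bool.not_eq_true', h]
  · intro i hi
    simp only [List.mem_range] at hi
    congr 1
    rw [Bool.eq_iff_iff, List.contains_iff_mem, mem_pvIdxs_iff]
    constructor
    · rintro ⟨j, hj, hij, hchk⟩
      simpa [hij] using hchk
    · intro hchk
      exact ⟨i, hi, by omega, hchk⟩

theorem update_inp_raises : Claim_raises_update_inp := by
  unfold Claim_raises_update_inp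
  exact ⟨fun inp criteria _ ⟨s, hs, h1, h2⟩ hpre => hpre s hs ⟨h1, h2⟩,
    by decide, ⟨"0", by decide⟩, by decide⟩

-- self-check: the raise witness lies inside Raises_ and hence outside Pre_, read off update_inp_raises
theorem pvRaiseWitness_update_inp_ok :
    Raises_update_inp pvRaiseWitness_update_inp.1 pvRaiseWitness_update_inp.2 ∧
    ¬ Pre_update_inp pvRaiseWitness_update_inp.1 pvRaiseWitness_update_inp.2 :=
  ⟨update_inp_raises.2.2.1,
   update_inp_raises.1 _ _ update_inp_raises.2.1 update_inp_raises.2.2.1⟩
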